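-- pv_equiv track=rewrite | github.com/AutomatedProcessImprovement/log-distance-measures | src/log_distance_measures/earth_movers_distance.py | _clean_histograms
-- ===== SOURCE A (Python) =====
-- from collections import Counter
-- from typing import Tuple, Union
--
-- def _clean_histograms(obs_1: Union[list, dict], obs_2: Union[list, dict]) -> Tuple[dict, dict]:
--     """
--     Transform two histograms (either 1-D list of observations or dictionary with 2-D) to two 2-D histograms without the observations that
--     they have in common.
--
--     :param obs_1: list with the 1-D histogram 1, or dict with the 2-D histogram 1.
--     :param obs_2: list with the 1-D histogram 2, or dict with the 2-D histogram 2.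
--
--     :return: both histograms in 2-D space, without the common observations.
--     """
--     # Transform to 2-D histograms
--     hist_1 = Counter(obs_1) if type(obs_1) is list else obs_1
--     hist_2 = Counter(obs_2) if type(obs_2) is list else obs_2
--     # Parse [hist_1] subtracting the mass that is already in [clean_hist_2]
--     clean_hist_1 = {}
--     for i in hist_1:
--         intersection_value = max(hist_1[i] - hist_2.get(i, 0), 0)
--         if intersection_value > 0:
--             clean_hist_1[i] = intersection_value
--     # Parse [hist_2] subtracting the mass that is already in [clean_hist_1]
--     clean_hist_2 = {}
--     for i in hist_2:
--         intersection_value = max(hist_2[i] - hist_1.get(i, 0), 0)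
--         if intersection_value > 0:
--             clean_hist_2[i] = intersection_value
--     # Return clean histograms
--     return clean_hist_1, clean_hist_2
-- ===== SOURCE B (Python) =====
-- from collections import Counter
-- from typing import Tuple, Union
--
-- def _clean_histograms(obs_1: Union[list, dict], obs_2: Union[list, dict]) -> Tuple[dict, dict]:
--     # Different decomposition: ONE pass over hist_1 that both builds clean_hist_1 and
--     # subtracts hist_1's mass in place from a residual copy of hist_2; clean_hist_2 is
--     # then just the positive part of that residual (no keyed pass over hist_2 against
--     # hist_1 at all). In-place updates keep hist_2's insertion order, so the result
--     # dicts are identical to A's.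
--     hist_1 = Counter(obs_1) if type(obs_1) is list else obs_1
--     hist_2 = Counter(obs_2) if type(obs_2) is list else obs_2
--     residual = dict(hist_2)
--     clean_hist_1 = {}
--     for k, v in hist_1.items():
--         r = residual.get(k)
--         if r is None:
--             if v > 0:
--                 clean_hist_1[k] = v
--         else:
--             if v > r:
--                 clean_hist_1[k] = v - r
--             residual[k] = r - v
--     clean_hist_2 = {k: v for k, v in residual.items() if v > 0}
--     return clean_hist_1, clean_hist_2
-- ===== Notes on version B (the rewrite author's own statement) =====
-- stated objective: alternative
-- what changed: B makes a single pass over hist_1 that simultaneously builds clean_hist_1 and subtracts hist_1's mass in place from a residual copy of hist_2, then takes the positive part of the residual as clean_hist_2, instead of A's two independent keyed subtraction passes (one over each histogram with lookups into the other).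
import Mathlib
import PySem

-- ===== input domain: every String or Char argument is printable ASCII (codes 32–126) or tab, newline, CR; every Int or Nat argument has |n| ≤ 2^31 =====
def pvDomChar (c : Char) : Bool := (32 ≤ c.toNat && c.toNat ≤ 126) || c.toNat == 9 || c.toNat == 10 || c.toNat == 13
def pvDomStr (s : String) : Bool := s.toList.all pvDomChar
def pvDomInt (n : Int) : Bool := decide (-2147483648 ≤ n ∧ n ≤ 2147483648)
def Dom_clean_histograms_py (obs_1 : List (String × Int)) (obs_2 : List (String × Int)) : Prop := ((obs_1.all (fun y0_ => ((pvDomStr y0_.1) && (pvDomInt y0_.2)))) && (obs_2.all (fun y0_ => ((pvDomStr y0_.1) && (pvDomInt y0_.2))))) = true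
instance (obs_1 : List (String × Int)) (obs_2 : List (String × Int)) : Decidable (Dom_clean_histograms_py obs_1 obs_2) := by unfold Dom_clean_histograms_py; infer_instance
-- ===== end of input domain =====

-- B replaces A's two independent keyed subtraction passes by ONE pass over hist_1 that builds
-- clean_hist_1 and subtracts hist_1's mass in place from a residual copy of hist_2; clean_hist_2
-- is the positive part of that residual (objective: alternative decomposition, same cost).


-- ===== PORT A =====
-- A receives dicts here (the Counter-of-list branch is for list inputs, outside this
-- signature); 'for i in hist_k' iterates keys, 'hist_k[i]' is exact via getD (i ∈ keys).
def clean_histograms_py (obs_1 : List (String × Int)) (obs_2 : List (String × Int)) : (List (String × Int)) × (List (String × Int)) :=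
  let hist_1 := PySem.Dict.ofList obs_1
  let hist_2 := PySem.Dict.ofList obs_2
  let clean_hist_1 := hist_1.keys.foldl (fun acc i =>
      let intersection_value := max (hist_1.getD i 0 - hist_2.getD i 0) 0
      if 0 < intersection_value then acc.insert i intersection_value else acc)
    (PySem.Dict.empty : PySem.Dict String Int)
  let clean_hist_2 := hist_2.keys.foldl (fun acc i =>
      let intersection_value := max (hist_2.getD i 0 - hist_1.getD i 0) 0
      if 0 < intersection_value then acc.insert i intersection_value else acc)
    (PySem.Dict.empty : PySem.Dict String Int)
  (clean_hist_1.items, clean_hist_2.items)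

-- ===== PORT B =====
-- 'residual.get(k)' is get?; 'residual[k] = r - v' overwrites in place (insert keeps the
-- position of an existing key, exact for Python dict); the final comprehension is a filter.
def clean_histograms_py_alt (obs_1 : List (String × Int)) (obs_2 : List (String × Int)) : (List (String × Int)) × (List (String × Int)) :=
  let hist_1 := PySem.Dict.ofList obs_1
  let hist_2 := PySem.Dict.ofList obs_2
  let st := hist_1.items.foldl (fun (st : PySem.Dict String Int × PySem.Dict String Int) p =>
      match st.2.get? p.1 with
      | none => (if (0 : Int) < p.2 then st.1.insert p.1 p.2 else st.1, st.2)
      | some r => (if r < p.2 then st.1.insert p.1 (p.2 - r) else st.1, st.2.insert p.1 (r - p.2)))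
    ((PySem.Dict.empty : PySem.Dict String Int), hist_2)
  (st.1.items, st.2.items.filter (fun p => decide (0 < p.2)))

-- ===== PRECONDITION & SPEC =====
def Spec_clean_histograms_py (obs_1 : List (String × Int)) (obs_2 : List (String × Int)) (out : (List (String × Int)) × (List (String × Int))) : Prop := out = clean_histograms_py_alt obs_1 obs_2
instance (obs_1 : List (String × Int)) (obs_2 : List (String × Int)) (out : (List (String × Int)) × (List (String × Int))) : Decidable (Spec_clean_histograms_py obs_1 obs_2 out) := by unfold Spec_clean_histograms_py; infer_instance

-- ===== CLAIM (what is proved, stated in full; the proofs are below) =====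
def Claim_equal_clean_histograms_py : Prop := ∀ (obs_1 : List (String × Int)) (obs_2 : List (String × Int)), Dom_clean_histograms_py obs_1 obs_2 → Spec_clean_histograms_py obs_1 obs_2 (clean_histograms_py obs_1 obs_2)

-- ===== LEMMAS AND PROOFS =====

-- A's insert-if-positive loop over distinct fresh keys appends exactly the positive entries.
theorem foldl_insert_pos_items (f : String → Int) :
    ∀ (ks : List String) (acc : PySem.Dict String Int),
      ks.Nodup → (∀ k ∈ ks, acc.contains k = false) →
      (ks.foldl (fun acc i =>
          let intersection_value := max (f i) 0
          if 0 < intersection_value then acc.insert i intersection_value else acc) acc).items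
        = acc.items ++ ks.filterMap (fun k => if 0 < f k then some (k, f k) else none) := by
  intro ks
  induction ks with
  | nil => intro acc _ _; simp
  | cons k t ih =>
    intro acc hnd hdis
    simp only [List.foldl_cons, List.filterMap_cons]
    by_cases hp : 0 < f k
    · have hmax : max (f k) 0 = f k := by omega
      have hc : acc.contains k = false := hdis k (by simp)
      simp only [hmax, if_pos hp]
      rw [ih (acc.insert k (f k)) hnd.of_cons]
      · rw [PySem.Dict.items_insert_of_not_contains _ _ hc]
        simp
      · intro j hj
        rw [PySem.Dict.contains_insert]
        have hjk : j ≠ k := by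
          rintro rfl; exact (List.nodup_cons.mp hnd).1 hj
        simp [hjk, hdis j (List.mem_cons_of_mem _ hj)]
    · have hif : ¬ 0 < max (f k) 0 := by omega
      simp only [if_neg hp, if_neg hif]
      exact ih acc hnd.of_cons (fun j hj => hdis j (List.mem_cons_of_mem _ hj))

-- filtering the positive-value entries of a value-map equals the filterMap form.
theorem filter_map_pos (f : String → Int) :
    ∀ (ks : List String),
      ((ks.map (fun k => (k, f k))).filter (fun p => decide (0 < p.2)))
        = ks.filterMap (fun k => if 0 < f k then some (k, f k) else none) := by
  intro ks
  induction ks with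
  | nil => simp
  | cons k t ih =>
    simp only [List.map_cons, List.filter_cons, List.filterMap_cons]
    by_cases hp : 0 < f k <;> simp [hp, ih]

-- first key match in an items list is exactly dict lookup.
theorem find?_key_eq_get? (k : String) :
    ∀ (l : List (String × Int)),
      l.find? (fun p => p.1 == k) = ((PySem.Dict.mk l).get? k).map (fun v => (k, v)) := by
  intro l
  induction l with
  | nil => simp [PySem.Dict.get?]
  | cons p t ih =>
    obtain ⟨a, b⟩ := p
    rw [List.find?_cons, PySem.Dict.get?_mk_cons]
    by_cases h : a = k
    · subst h; simp
    · have hb : (a == k) = false := by simp [h]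
      simp [hb, ih]

-- the value update applied to each surviving hist_2 entry by B's in-place subtraction.
def pvUpd (l : List (String × Int)) (q : String × Int) : String × Int :=
  match l.find? (fun p => p.1 == q.1) with
  | some p => (q.1, q.2 - p.2)
  | none => q

-- B's single pass: clean_hist_1 collects the positive differences of hist_1's entries,
-- and the residual is hist_2's items with hist_1's mass subtracted in place.
theorem B_loop (h2 : PySem.Dict String Int) :
    ∀ (l : List (String × Int)) (ch1 res : PySem.Dict String Int),
      (l.map Prod.fst).Nodup →
      (∀ p ∈ l, ch1.contains p.1 = false) →
      (∀ p ∈ l, res.get? p.1 = h2.get? p.1) →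
      res.keys.Nodup →
      (l.foldl (fun (st : PySem.Dict String Int × PySem.Dict String Int) p =>
          match st.2.get? p.1 with
          | none => (if (0 : Int) < p.2 then st.1.insert p.1 p.2 else st.1, st.2)
          | some r => (if r < p.2 then st.1.insert p.1 (p.2 - r) else st.1, st.2.insert p.1 (r - p.2)))
        (ch1, res)).1.items
        = ch1.items ++ l.filterMap (fun p =>
            if (0 : Int) < p.2 - h2.getD p.1 0 then some (p.1, p.2 - h2.getD p.1 0) else none)
      ∧ (l.foldl (fun (st : PySem.Dict String Int × PySem.Dict String Int) p =>
          match st.2.get? p.1 with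
          | none => (if (0 : Int) < p.2 then st.1.insert p.1 p.2 else st.1, st.2)
          | some r => (if r < p.2 then st.1.insert p.1 (p.2 - r) else st.1, st.2.insert p.1 (r - p.2)))
        (ch1, res)).2.items
        = res.items.map (pvUpd l) := by
  intro l
  induction l with
  | nil =>
    intro ch1 res _ _ _ _
    refine ⟨by simp, ?_⟩
    rw [show pvUpd [] = id from funext (fun q => rfl), List.map_id]
    rfl
  | cons a t ih =>
    intro ch1 res hnd hch1 hres hndres
    have hak : a.1 ∉ t.map Prod.fst := (List.nodup_cons.mp hnd).1
    have hndt : (t.map Prod.fst).Nodup := (List.nodup_cons.mp hnd).2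
    have hca : ch1.contains a.1 = false := hch1 a (by simp)
    rw [List.foldl_cons, List.filterMap_cons]
    cases hg : res.get? a.1 with
    | none =>
      have hg2 : h2.get? a.1 = none := by rw [← hres a (by simp)]; exact hg
      have hd2 : h2.getD a.1 0 = 0 := by rw [PySem.Dict.getD_eq_get?_getD, hg2]; rfl
      have hch1' : ∀ p ∈ t, (if (0 : Int) < a.2 then ch1.insert a.1 a.2 else ch1).contains p.1 = false := by
        intro p hp
        have hpa : p.1 ≠ a.1 := by
          intro h; exact hak (h ▸ List.mem_map_of_mem hp)
        split
        · rw [PySem.Dict.contains_insert]; simp [hpa, hch1 p (List.mem_cons_of_mem _ hp)]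
        · exact hch1 p (List.mem_cons_of_mem _ hp)
      obtain ⟨ih1, ih2⟩ := ih (if (0 : Int) < a.2 then ch1.insert a.1 a.2 else ch1) res hndt hch1'
        (fun p hp => hres p (List.mem_cons_of_mem _ hp)) hndres
      simp only [hd2, sub_zero]
      constructor
      · rw [ih1]
        by_cases hp : (0 : Int) < a.2
        · rw [if_pos hp, if_pos hp, PySem.Dict.items_insert_of_not_contains _ _ hca]
          simp
        · rw [if_neg hp, if_neg hp]
      · rw [ih2]
        apply List.map_congr_left
        intro q hq
        have hqa : (a.1 == q.1) = false := by
          have hna : a.1 ∉ res.keys := (PySem.Dict.get?_eq_none_iff_not_mem_keys res a.1).mp hg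
          have hqk : q.1 ∈ res.keys := PySem.Dict.mem_keys_of_mem_items res hq
          simp only [beq_eq_false_iff_ne, ne_eq]
          intro h; exact hna (by rw [h]; exact hqk)
        simp only [pvUpd, List.find?_cons, hqa]
    | some r =>
      have hg2 : h2.get? a.1 = some r := by rw [← hres a (by simp)]; exact hg
      have hd2 : h2.getD a.1 0 = r := by rw [PySem.Dict.getD_eq_get?_getD, hg2]; rfl
      have hmem : a.1 ∈ res.keys := by
        by_contra h
        rw [← PySem.Dict.get?_eq_none_iff_not_mem_keys res a.1] at h
        rw [h] at hg; cases hg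
      have hcres : res.contains a.1 = true := (PySem.Dict.contains_iff_mem_keys res a.1).mpr hmem
      have hch1' : ∀ p ∈ t, (if r < a.2 then ch1.insert a.1 (a.2 - r) else ch1).contains p.1 = false := by
        intro p hp
        have hpa : p.1 ≠ a.1 := by
          intro h; exact hak (h ▸ List.mem_map_of_mem hp)
        split
        · rw [PySem.Dict.contains_insert]; simp [hpa, hch1 p (List.mem_cons_of_mem _ hp)]
        · exact hch1 p (List.mem_cons_of_mem _ hp)
      have hres' : ∀ p ∈ t, (res.insert a.1 (r - a.2)).get? p.1 = h2.get? p.1 := by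
        intro p hp
        have hpa : p.1 ≠ a.1 := by
          intro h; exact hak (h ▸ List.mem_map_of_mem hp)
        rw [PySem.Dict.get?_insert_of_ne _ _ hpa]
        exact hres p (List.mem_cons_of_mem _ hp)
      obtain ⟨ih1, ih2⟩ := ih (if r < a.2 then ch1.insert a.1 (a.2 - r) else ch1)
        (res.insert a.1 (r - a.2)) hndt hch1' hres' (PySem.Dict.nodup_keys_insert _ _ _ hndres)
      simp only [hd2]
      constructor
      · rw [ih1]
        by_cases hp : r < a.2
        · rw [if_pos hp, if_pos (by omega : (0 : Int) < a.2 - r), PySem.Dict.items_insert_of_not_contains _ _ hca]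
          simp
        · rw [if_neg hp, if_neg (by omega : ¬ (0 : Int) < a.2 - r)]
      · rw [ih2, PySem.Dict.items_insert_of_contains _ _ hcres, List.map_map]
        apply List.map_congr_left
        intro q hq
        by_cases hqa : q.1 = a.1
        · have hqr : q.2 = r := by
            have hgq := PySem.Dict.get?_of_mem_items res (k := q.1) (v := q.2) (by simpa using hq) hndres
            rw [hqa] at hgq; rw [hgq] at hg; cases hg; rfl
          have hb : (q.1 == a.1) = true := by simp [hqa]
          have hft : t.find? (fun p => p.1 == a.1) = none := by
            apply List.find?_eq_none.mpr
            intro p hp hpb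
            exact hak ((beq_iff_eq.mp hpb) ▸ List.mem_map_of_mem hp)
          simp only [Function.comp_apply, hb, if_pos trivial, pvUpd, List.find?_cons, hft]
          simp [hqa, hqr]
        · have hb : (q.1 == a.1) = false := by simp [hqa]
          have hb2 : (a.1 == q.1) = false := by
            simp only [beq_eq_false_iff_ne, ne_eq]
            intro h; exact hqa h.symm
          simp [pvUpd, Function.comp, hb, hb2]

-- ===== VERDICT (by name: the statement is the Claim_ definition above) =====
theorem clean_histograms_py_spec : Claim_equal_clean_histograms_py := by
  intro obs_1 obs_2 _
  show clean_histograms_py obs_1 obs_2 = clean_histograms_py_alt obs_1 obs_2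
  unfold clean_histograms_py clean_histograms_py_alt
  dsimp only
  set h1 := PySem.Dict.ofList obs_1 with hh1
  set h2 := PySem.Dict.ofList obs_2 with hh2
  have hnd1 : h1.keys.Nodup := by rw [hh1]; exact PySem.Dict.nodup_keys_ofList obs_1
  have hnd2 : h2.keys.Nodup := by rw [hh2]; exact PySem.Dict.nodup_keys_ofList obs_2
  have hkeys1 : h1.items.map Prod.fst = h1.keys := rfl
  have hitems1 : h1.items = h1.keys.map (fun k => (k, h1.getD k 0)) :=
    PySem.Dict.items_eq_map_keys h1 hnd1 0
  have hitems2 : h2.items = h2.keys.map (fun k => (k, h2.getD k 0)) :=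
    PySem.Dict.items_eq_map_keys h2 hnd2 0
  obtain ⟨hB1, hB2⟩ := B_loop h2 h1.items PySem.Dict.empty h2 (by rw [hkeys1]; exact hnd1)
    (fun p _ => PySem.Dict.contains_empty p.1) (fun p _ => rfl) hnd2
  refine Prod.ext ?_ ?_ <;> dsimp only
  · -- clean_hist_1
    rw [foldl_insert_pos_items (fun i => h1.getD i 0 - h2.getD i 0) h1.keys _ hnd1
        (fun k _ => PySem.Dict.contains_empty k), hB1]
    conv_rhs => rw [hitems1, List.filterMap_map]
    simp [PySem.Dict.empty, Function.comp]
  · -- clean_hist_2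
    rw [foldl_insert_pos_items (fun i => h2.getD i 0 - h1.getD i 0) h2.keys _ hnd2
        (fun k _ => PySem.Dict.contains_empty k), hB2]
    conv_rhs => rw [hitems2, List.map_map]
    have hupd : (pvUpd h1.items ∘ fun k => (k, h2.getD k 0))
        = fun k => (k, h2.getD k 0 - h1.getD k 0) := by
      funext k
      simp only [Function.comp_apply, pvUpd]
      rw [find?_key_eq_get? k h1.items]
      show (match (h1.get? k).map (fun v => (k, v)) with
            | some p => (k, h2.getD k 0 - p.2) | none => (k, h2.getD k 0)) = _
      cases hg : h1.get? k with
      | none =>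
        have : h1.getD k 0 = 0 := by rw [PySem.Dict.getD_eq_get?_getD, hg]; rfl
        simp [this]
      | some v =>
        have : h1.getD k 0 = v := by rw [PySem.Dict.getD_eq_get?_getD, hg]; rfl
        simp [this]
    rw [hupd, filter_map_pos (fun k => h2.getD k 0 - h1.getD k 0)]
    simp [PySem.Dict.empty]
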